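-- pv_equiv track=rewrite | github.com/thePurpleUnicorn/AoC_24 | 21c.py | kill_wrongs_num
-- ===== SOURCE A (Python) =====
-- def kill_wrongs_num(start_row, start_colum, seqenses):
--     correct_seqenses = list()
--     for seq in seqenses:
--         row = start_row
--         colum = start_colum
--         works = True
--         for elem in seq:
--             match elem:
--                 case '<':
--                     colum += -1
--                 case '>':
--                     colum += 1
--                 case 'v':
--                     row += -1
--                 case '^':
--                     row += 1
--             if row == 0 and colum == 0:
--                 works = False
--                 break
--         if works:
--             correct_seqenses.append(seq)
--     return correct_seqenses
-- ===== SOURCE B (Python) =====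
-- def _zero_steps(start, seq, dec_ch, inc_ch):
--     """Indices i such that this coordinate is zero after processing seq[i]."""
--     steps = []
--     v = start
--     i = 0
--     for ch in seq:
--         if ch == dec_ch:
--             v -= 1
--         elif ch == inc_ch:
--             v += 1
--         if v == 0:
--             steps.append(i)
--         i += 1
--     return steps
--
--
-- def kill_wrongs_num(start_row, start_colum, seqenses):
--     # A sequence walks through (0,0) iff some step index makes the row
--     # coordinate zero AND the column coordinate zero: scan each axis
--     # independently and reject when the two index sets intersect.
--     return [seq for seq in seqenses
--             if set(_zero_steps(start_row, seq, 'v', '^')).isdisjoint(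
--                 _zero_steps(start_colum, seq, '<', '>'))]
-- ===== Notes on version B (the rewrite author's own statement) =====
-- stated objective: alternative
-- what changed: B decomposes the problem per axis: it scans each coordinate independently, collecting the step indices at which that coordinate is zero, and keeps a sequence iff the two index sets are disjoint, replacing A's joint 2-D walk with early break.
import Mathlib
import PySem

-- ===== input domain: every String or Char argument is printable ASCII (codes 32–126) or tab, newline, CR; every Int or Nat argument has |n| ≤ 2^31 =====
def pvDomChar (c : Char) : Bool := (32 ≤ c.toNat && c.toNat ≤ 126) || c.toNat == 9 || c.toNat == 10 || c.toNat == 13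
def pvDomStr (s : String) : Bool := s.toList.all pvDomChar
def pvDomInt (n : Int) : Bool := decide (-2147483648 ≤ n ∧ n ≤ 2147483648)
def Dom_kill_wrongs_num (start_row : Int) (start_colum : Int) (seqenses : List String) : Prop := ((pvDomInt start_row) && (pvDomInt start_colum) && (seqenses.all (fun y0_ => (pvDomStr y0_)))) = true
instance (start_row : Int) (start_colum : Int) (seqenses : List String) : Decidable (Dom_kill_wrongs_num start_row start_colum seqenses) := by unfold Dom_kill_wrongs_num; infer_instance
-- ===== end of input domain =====

-- B scans each coordinate axis independently, collecting the step indices at which that coordinate is zero, and keeps a sequence iff the two index sets are disjoint; objective: alternative decomposition.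
-- ===== PORT A =====
-- inner 'for elem in seq' loop of A, with the break as an early false
def pvWalkA (row : Int) (colum : Int) (l : List Char) : Bool :=
  match l with
  | [] => true
  | e :: rest =>
    let rc : Int × Int :=
      if e = '<' then (row, colum + (-1))
      else if e = '>' then (row, colum + 1)
      else if e = 'v' then (row + (-1), colum)
      else if e = '^' then (row + 1, colum)
      else (row, colum)
    if rc.1 = 0 ∧ rc.2 = 0 then false else pvWalkA rc.1 rc.2 rest

def kill_wrongs_num (start_row : Int) (start_colum : Int) (seqenses : List String) : List String :=
  seqenses.foldl (fun correct_seqenses seq =>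
    if pvWalkA start_row start_colum seq.toList then correct_seqenses ++ [seq]
    else correct_seqenses) []

-- ===== PORT B =====
-- _zero_steps: loop over the characters with state (steps, v, i)
def pvZeroSteps (start : Int) (l : List Char) (decCh incCh : Char) : List Int :=
  (l.foldl (fun (st : List Int × Int × Int) ch =>
      let v := if ch = decCh then st.2.1 - 1 else if ch = incCh then st.2.1 + 1 else st.2.1
      ((if v = 0 then st.1 ++ [st.2.2] else st.1), v, st.2.2 + 1)) ([], start, 0)).1

def kill_wrongs_num_alt (start_row : Int) (start_colum : Int) (seqenses : List String) : List String :=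
  seqenses.filter (fun seq =>
    (pvZeroSteps start_row seq.toList 'v' '^').all
      (fun j => decide (j ∉ pvZeroSteps start_colum seq.toList '<' '>')))

-- ===== PRECONDITION & SPEC =====
def Spec_kill_wrongs_num (start_row : Int) (start_colum : Int) (seqenses : List String) (out : List String) : Prop := out = kill_wrongs_num_alt start_row start_colum seqenses
instance (start_row : Int) (start_colum : Int) (seqenses : List String) (out : List String) : Decidable (Spec_kill_wrongs_num start_row start_colum seqenses out) := by unfold Spec_kill_wrongs_num; infer_instance

-- ===== CLAIM (what is proved, stated in full; the proofs are below) =====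
def Claim_equal_kill_wrongs_num : Prop := ∀ (start_row : Int) (start_colum : Int) (seqenses : List String), Dom_kill_wrongs_num start_row start_colum seqenses → Spec_kill_wrongs_num start_row start_colum seqenses (kill_wrongs_num start_row start_colum seqenses)

-- ===== LEMMAS AND PROOFS =====

-- recursive characterisation of B's _zero_steps loop, parameterised by the start index
def pvStepsFrom (decCh incCh : Char) (v i : Int) : List Char → List Int
  | [] => []
  | c :: r =>
    let v' := if c = decCh then v - 1 else if c = incCh then v + 1 else v
    (if v' = 0 then [i] else []) ++ pvStepsFrom decCh incCh v' (i + 1) r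

theorem pvZeroSteps_fold (decCh incCh : Char) :
    ∀ (l : List Char) (acc : List Int) (v i : Int),
      (l.foldl (fun (st : List Int × Int × Int) ch =>
        let v := if ch = decCh then st.2.1 - 1 else if ch = incCh then st.2.1 + 1 else st.2.1
        ((if v = 0 then st.1 ++ [st.2.2] else st.1), v, st.2.2 + 1)) (acc, v, i)).1
      = acc ++ pvStepsFrom decCh incCh v i l := by
  intro l
  induction l with
  | nil => intro acc v i; simp [pvStepsFrom]
  | cons c r ih =>
    intro acc v i
    simp only [List.foldl_cons, pvStepsFrom]
    rw [ih]
    split_ifs <;> simp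

theorem pvZeroSteps_eq (start : Int) (l : List Char) (decCh incCh : Char) :
    pvZeroSteps start l decCh incCh = pvStepsFrom decCh incCh start 0 l := by
  unfold pvZeroSteps
  rw [pvZeroSteps_fold]
  simp

theorem pvStepsFrom_mem_ge (decCh incCh : Char) :
    ∀ (l : List Char) (v i j : Int), j ∈ pvStepsFrom decCh incCh v i l → i ≤ j := by
  intro l
  induction l with
  | nil => intro v i j h; simp [pvStepsFrom] at h
  | cons c r ih =>
    intro v i j h
    simp only [pvStepsFrom, List.mem_append] at h
    rcases h with h | h
    · split_ifs at h <;> simp_all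
    · have := ih _ (i + 1) j h; omega

-- A's joint step equals the pair of per-axis steps
theorem pvJointStep (e : Char) (r c : Int) :
    (if e = '<' then ((r, c + (-1)) : Int × Int)
      else if e = '>' then (r, c + 1)
      else if e = 'v' then (r + (-1), c)
      else if e = '^' then (r + 1, c)
      else (r, c))
    = ((if e = 'v' then r - 1 else if e = '^' then r + 1 else r),
       (if e = '<' then c - 1 else if e = '>' then c + 1 else c)) := by
  split_ifs <;> simp_all <;> omega

-- A's joint walk succeeds iff B's per-axis zero-index lists are disjoint
theorem pvWalkA_iff (l : List Char) : ∀ (r c i : Int),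
    pvWalkA r c l = true ↔
      ∀ j ∈ pvStepsFrom 'v' '^' r i l, j ∉ pvStepsFrom '<' '>' c i l := by
  induction l with
  | nil => intro r c i; simp [pvWalkA, pvStepsFrom]
  | cons e rest ih =>
    intro r c i
    simp only [pvWalkA, pvJointStep, pvStepsFrom]
    generalize hR : (if e = 'v' then r - 1 else if e = '^' then r + 1 else r) = R
    generalize hC : (if e = '<' then c - 1 else if e = '>' then c + 1 else c) = C
    have hrow := pvStepsFrom_mem_ge 'v' '^' rest R (i + 1)
    have hcol := pvStepsFrom_mem_ge '<' '>' rest C (i + 1)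
    by_cases hz : R = 0 ∧ C = 0
    · rw [if_pos hz, hz.1, hz.2]
      constructor
      · intro h; exact absurd h (by simp)
      · intro h
        exact absurd (h i (by simp)) (by simp)
    · rw [if_neg hz]
      rw [ih R C (i + 1)]
      constructor
      · intro h j hj hjc
        rcases List.mem_append.mp hj with hj0 | hjr
        · -- j comes from the head row-zero singleton: R = 0, j = i; then C ≠ 0
          split_ifs at hj0 with h0
          · simp only [List.mem_singleton] at hj0
            rcases List.mem_append.mp hjc with hc0 | hcr
            · split_ifs at hc0 with hc0'
              · exact hz ⟨h0, hc0'⟩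
              · simp at hc0
            · have := hcol j hcr; omega
          · simp at hj0
        · rcases List.mem_append.mp hjc with hc0 | hcr
          · split_ifs at hc0 with hc0'
            · simp only [List.mem_singleton] at hc0
              have := hrow j hjr; omega
            · simp at hc0
          · exact h j hjr hcr
      · intro h j hjr hcr
        exact h j (List.mem_append.mpr (Or.inr hjr)) (List.mem_append.mpr (Or.inr hcr))

theorem pvWalkA_eq_all (start_row start_colum : Int) (l : List Char) :
    pvWalkA start_row start_colum l =
      (pvZeroSteps start_row l 'v' '^').all
        (fun j => decide (j ∉ pvZeroSteps start_colum l '<' '>')) := by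
  rw [Bool.eq_iff_iff, List.all_eq_true]
  rw [pvWalkA_iff l start_row start_colum 0]
  simp [pvZeroSteps_eq]

-- ===== VERDICT (by name: the statement is the Claim_ definition above) =====
theorem kill_wrongs_num_spec : Claim_equal_kill_wrongs_num := by
  intro start_row start_colum seqenses _
  unfold Spec_kill_wrongs_num kill_wrongs_num kill_wrongs_num_alt
  rw [PySem.List.foldl_append_if_eq_filter, List.nil_append]
  apply List.filter_congr
  intro seq _
  exact pvWalkA_eq_all start_row start_colum seq.toList
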